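-- pv_equiv track=rewrite | github.com/breid1313/COMP5520-quiz | main.py | get_z_from_y
-- ===== SOURCE A (Python) =====
-- from typing import List
--
-- def is_prime(num: int):
--     # returns True if a number is prime and False otherwise
--     if num <= 1:
--         return False
--     else:
--         for i in range(2, num):
--             if num % i == 0:
--                 return False
--     return True
--
-- def get_z_from_y(y: List[int]):
--     # gets the indexes of y where the index is not a prime number.
--     # per the problem, indexes start at 1, not zero
--     y_indexes = [i for i in range(1, len(y) + 1)]
--
--     y_not_prime_indexes = []
--     for num in y_indexes:
--         if not is_prime(num):
--             y_not_prime_indexes.append(num)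
--
--     z = [y[i - 1] for i in y_not_prime_indexes]
--
--     return z
-- ===== SOURCE B (Python) =====
-- def get_z_from_y(y):
--     # Sieve-style: mark every proper multiple m = c*p (c, p >= 2) up to n
--     # as a composite index, then collect y at index 1 and at composite indexes
--     # (1-based), i.e. at all non-prime 1-based indexes.
--     n = len(y)
--     composite = set()
--     for p in range(2, n + 1):
--         for m in range(2 * p, n + 1, p):
--             composite.add(m)
--     return [y[j] for j in range(n) if j == 0 or (j + 1) in composite]
-- ===== Notes on version B (the rewrite author's own statement) =====
-- stated objective: faster
-- what changed: Replaces per-index trial-division primality testing with one sieve pass that marks all composite indexes up to n in a set, then collects the values at index 1 and at marked indexes in a single comprehension.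
import Mathlib
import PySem

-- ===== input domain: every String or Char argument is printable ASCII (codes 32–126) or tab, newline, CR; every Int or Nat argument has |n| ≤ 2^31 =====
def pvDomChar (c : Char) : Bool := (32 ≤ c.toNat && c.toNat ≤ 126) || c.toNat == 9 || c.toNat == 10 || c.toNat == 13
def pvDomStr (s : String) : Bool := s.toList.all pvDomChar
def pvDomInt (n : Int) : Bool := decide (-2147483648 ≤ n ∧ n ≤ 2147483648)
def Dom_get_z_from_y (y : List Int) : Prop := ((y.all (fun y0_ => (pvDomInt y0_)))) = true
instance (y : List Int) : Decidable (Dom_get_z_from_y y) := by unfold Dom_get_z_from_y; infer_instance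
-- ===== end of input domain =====

-- B replaces A's per-index trial-division primality tests with a single sieve pass
-- marking all composite indexes up to n in a set (objective: faster).

-- ===== PORT A =====
-- the 'for i in range(2, num): if num % i == 0: return False' loop of is_prime
def pvIsPrimeLoop (num : Int) : List Int → Bool
  | [] => true
  | i :: rest => if PySem.Int.mod num i == 0 then false else pvIsPrimeLoop num rest

def pvIsPrime (num : Int) : Bool :=
  if num ≤ 1 then false else pvIsPrimeLoop num (PySem.List.pyRange 2 num 1)

def get_z_from_y (y : List Int) : List Int :=
  let y_indexes := PySem.List.pyRange 1 ((y.length : Int) + 1) 1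
  let y_not_prime_indexes :=
    y_indexes.foldl (fun acc num => if !pvIsPrime num then acc ++ [num] else acc) ([] : List Int)
  -- [y[i-1] for i in y_not_prime_indexes]: Python indexing would raise on an out-of-range
  -- index but every i-1 here lies in range, so collecting the defined values is exact
  y_not_prime_indexes.filterMap (fun i => PySem.List.pyGet? y (i - 1))

-- ===== PORT B =====
def get_z_from_y_alt (y : List Int) : List Int :=
  let n : Int := y.length
  let composite : PySem.Set Int :=
    (PySem.List.pyRange 2 (n + 1) 1).foldl
      (fun s p => (PySem.List.pyRange (2 * p) (n + 1) p).foldl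
        (fun s m => PySem.Set.add s m) s)
      PySem.Set.empty
  (PySem.List.pyRange 0 n 1).filterMap (fun j =>
    if j == 0 || composite.contains (j + 1) then PySem.List.pyGet? y j else none)

-- ===== PRECONDITION & SPEC =====
def Spec_get_z_from_y (y : List Int) (out : List Int) : Prop := out = get_z_from_y_alt y
instance (y : List Int) (out : List Int) : Decidable (Spec_get_z_from_y y out) := by unfold Spec_get_z_from_y; infer_instance

-- ===== CLAIM (what is proved, stated in full; the proofs are below) =====
def Claim_equal_get_z_from_y : Prop := ∀ (y : List Int), Dom_get_z_from_y y → Spec_get_z_from_y y (get_z_from_y y)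

-- ===== LEMMAS AND PROOFS =====

-- B's composite set, as built inside get_z_from_y_alt
def pvComposites (n : Int) : PySem.Set Int :=
  (PySem.List.pyRange 2 (n + 1) 1).foldl
    (fun s p => (PySem.List.pyRange (2 * p) (n + 1) p).foldl
      (fun s m => PySem.Set.add s m) s)
    PySem.Set.empty

theorem pvIsPrimeLoop_iff (num : Int) (l : List Int) :
    pvIsPrimeLoop num l = true ↔ ∀ i ∈ l, ¬ i ∣ num := by
  induction l with
  | nil => simp [pvIsPrimeLoop]
  | cons i rest ih =>
    simp only [pvIsPrimeLoop]
    by_cases h : PySem.Int.mod num i = 0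
    · have : i ∣ num := (PySem.Int.mod_eq_zero_iff_dvd num i).mp h
      simp [h, this]
    · have : ¬ i ∣ num := fun hd => h ((PySem.Int.mod_eq_zero_iff_dvd num i).mpr hd)
      simp [h, ih, this]

theorem pvIsPrime_iff (i : Int) (h2 : 2 ≤ i) :
    pvIsPrime i = true ↔ ∀ d, 2 ≤ d → d < i → ¬ d ∣ i := by
  have : ¬ i ≤ 1 := by omega
  simp only [pvIsPrime, this, if_false, pvIsPrimeLoop_iff, PySem.List.mem_pyRange_one]
  constructor
  · intro h d hd1 hd2; exact h d ⟨hd1, hd2⟩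
  · intro h d ⟨hd1, hd2⟩; exact h d hd1 hd2

theorem mem_nested_foldl_add (L : List Int) (g : Int → List Int) (s : PySem.Set Int) (x : Int) :
    x ∈ L.foldl (fun s p => (g p).foldl (fun s m => PySem.Set.add s m) s) s ↔
      x ∈ s ∨ ∃ p ∈ L, x ∈ g p := by
  induction L generalizing s with
  | nil => simp
  | cons p rest ih =>
    rw [List.foldl_cons, ih]
    rw [PySem.Set.mem_foldl_add (g p) (fun m => m) s x]
    simp only [List.mem_cons]
    constructor
    · rintro (⟨h | ⟨b, hb, rfl⟩⟩ | ⟨q, hq, hx⟩)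
      · exact Or.inl h
      · exact Or.inr ⟨p, Or.inl rfl, hb⟩
      · exact Or.inr ⟨q, Or.inr hq, hx⟩
    · rintro (h | ⟨q, (rfl | hq), hx⟩)
      · exact Or.inl (Or.inl h)
      · exact Or.inl (Or.inr ⟨x, hx, rfl⟩)
      · exact Or.inr ⟨q, hq, hx⟩

theorem mem_pvComposites (n x : Int) :
    x ∈ pvComposites n ↔ ∃ p, 2 ≤ p ∧ p < n + 1 ∧ x ∈ PySem.List.pyRange (2 * p) (n + 1) p := by
  unfold pvComposites
  rw [mem_nested_foldl_add]
  simp only [PySem.Set.empty]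
  constructor
  · rintro (h | ⟨p, hp, hx⟩)
    · simp at h
    · rw [PySem.List.mem_pyRange_one] at hp; exact ⟨p, hp.1, hp.2, hx⟩
  · rintro ⟨p, h1, h2, hx⟩
    exact Or.inr ⟨p, PySem.List.mem_pyRange_one.mpr ⟨h1, h2⟩, hx⟩

-- the pointwise fact: for 1 ≤ i ≤ n, "i is not prime" = "i = 1 or i is a marked composite"
theorem keep_iff (n i : Int) (h1 : 1 ≤ i) (hn : i ≤ n) :
    (¬ pvIsPrime i = true) ↔ (i = 1 ∨ i ∈ pvComposites n) := by
  rcases eq_or_lt_of_le h1 with h | h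
  · subst h
    simp [pvIsPrime]
  · have h2 : 2 ≤ i := by omega
    rw [pvIsPrime_iff i h2, mem_pvComposites]
    constructor
    · intro hnp
      push Not at hnp
      obtain ⟨d, hd2, hdi, hdvd⟩ := hnp
      obtain ⟨q, rfl⟩ := hdvd
      have hd0 : 0 < d := by omega
      have hq2 : 2 ≤ q := by nlinarith
      have h2d : 2 * d ≤ d * q := by nlinarith
      refine Or.inr ⟨d, hd2, by omega, ?_⟩
      rw [PySem.List.mem_pyRange_iff_of_pos (by omega)]
      refine ⟨h2d, by omega, ⟨q - 2, by ring⟩⟩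
    · rintro (rfl | ⟨p, hp2, hpn, hx⟩)
      · omega
      · rw [PySem.List.mem_pyRange_iff_of_pos (by omega)] at hx
        obtain ⟨hlo, hhi, k, hk⟩ := hx
        intro hall
        exact hall p hp2 (by omega) ⟨k + 2, by linarith [hk]⟩

-- ===== VERDICT (by name: the statement is the Claim_ definition above) =====
theorem get_z_from_y_spec : Claim_equal_get_z_from_y := by
  intro y _
  show get_z_from_y y = get_z_from_y_alt y
  simp only [get_z_from_y, get_z_from_y_alt]
  rw [PySem.List.foldl_append_if_eq_filter (fun num => !pvIsPrime num)]
  rw [List.nil_append, List.filterMap_filter]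
  rw [PySem.List.pyRange_one 1 ((y.length : Int) + 1), PySem.List.pyRange_one 0 (y.length : Int)]
  have hn1 : ((y.length : Int) + 1 - 1).toNat = y.length := by omega
  have hn0 : ((y.length : Int) - 0).toNat = y.length := by omega
  rw [hn1, hn0, List.filterMap_map, List.filterMap_map]
  apply List.filterMap_congr
  intro k hk
  rw [List.mem_range] at hk
  simp only [Function.comp_apply, zero_add, add_sub_cancel_left]
  have hcond : (!pvIsPrime (1 + (k : Int))) =
      (((k : Int) == 0) || (pvComposites (y.length : Int)).contains ((k : Int) + 1)) := by
    rw [show (1 : Int) + (k : Int) = (k : Int) + 1 by ring]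
    rw [Bool.eq_iff_iff]
    simp only [Bool.not_eq_true', Bool.or_eq_true, beq_iff_eq]
    have hmem : ((pvComposites (y.length : Int)).contains ((k : Int) + 1) = true) ↔
        ((k : Int) + 1) ∈ pvComposites (y.length : Int) := by
      simp [PySem.Set.contains]
    rw [hmem]
    rw [show (pvIsPrime ((k : Int) + 1) = false) ↔ ¬ (pvIsPrime ((k : Int) + 1) = true) from by simp]
    rw [keep_iff (y.length : Int) ((k : Int) + 1) (by omega) (by omega)]
    constructor
    · rintro (h | h)
      · left; omega
      · right; exact h
    · rintro (h | h)
      · left; omega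
      · right; exact h
  rw [hcond]
  rfl
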